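-- pv_equiv track=rewrite | github.com/JPKP-Kuhn/Desafios-Maratona-Prog | POO1/mini_poker.py | duas_duplas
-- ===== SOURCE A (Python) =====
-- def count_freq(mao) -> dict:
--     d = dict()
--     for i in mao:
--         d[i] = d.get(i,0)+1
--     return d
--
-- def duas_duplas(mao) -> int:
--     l = set(mao)
--     if len(l) == 3:
--         d = count_freq(mao)
--         mx, my =0, 100
--         for k, v in d.items():
--             if v == 1 or v == 2:
--                 if v ==2:
--                     mx = max(mx, k)
--                     my = min(my, k)
--             else:
--                 return 0
--         return 3*mx+2*my+20
--     else:
--         return 0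
-- ===== SOURCE B (Python) =====
-- def duas_duplas(mao) -> int:
--     # run-length scan of the sorted hand instead of a set + dict + early-return loop
--     s = sorted(mao)
--     runs = []  # (value, multiplicity), values strictly increasing
--     i, n = 0, len(s)
--     while i < n:
--         j = i
--         while j < n and s[j] == s[i]:
--             j += 1
--         runs.append((s[i], j - i))
--         i = j
--     if len(runs) != 3 or any(c > 2 for _, c in runs):
--         return 0
--     pares = [v for v, c in runs if c == 2]
--     return 3 * max([0] + pares) + 2 * min([100] + pares) + 20
-- ===== Notes on version B (the rewrite author's own statement) =====
-- stated objective: alternative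
-- what changed: Replaces the set + frequency-dict + early-return validation loop by a single run-length scan of the sorted hand: the runs give the three-distinct-values check, the multiplicity check and the two pair values directly, and the score is a closed max/min formula over the pair values.
import Mathlib
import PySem

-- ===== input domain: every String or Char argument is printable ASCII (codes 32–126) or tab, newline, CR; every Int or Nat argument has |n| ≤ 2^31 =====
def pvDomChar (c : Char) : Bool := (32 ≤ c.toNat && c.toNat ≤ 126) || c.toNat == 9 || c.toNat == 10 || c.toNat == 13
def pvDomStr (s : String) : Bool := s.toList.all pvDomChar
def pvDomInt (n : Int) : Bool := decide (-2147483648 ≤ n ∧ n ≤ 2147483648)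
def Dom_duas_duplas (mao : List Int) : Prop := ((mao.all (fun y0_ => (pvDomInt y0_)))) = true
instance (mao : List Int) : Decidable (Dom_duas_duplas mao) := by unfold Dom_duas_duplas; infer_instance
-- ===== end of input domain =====

-- B replaces the set + frequency-dict + early-return loop by one run-length scan of the
-- sorted hand (objective: alternative decomposition, same cost up to the sort).

-- ===== PORT A =====
def count_freq (mao : List Int) : PySem.Dict Int Int :=
  mao.foldl (fun d i => d.insert i (d.getD i 0 + 1)) PySem.Dict.empty

-- the 'for k, v in d.items()' loop with its early 'return 0'
def duasLoopA : List (Int × Int) → Int → Int → Int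
  | [], mx, my => 3 * mx + 2 * my + 20
  | (k, v) :: rest, mx, my =>
    if v == 1 || v == 2 then
      if v == 2 then duasLoopA rest (max mx k) (min my k)
      else duasLoopA rest mx my
    else 0

def duas_duplas (mao : List Int) : Int :=
  let l := PySem.Set.ofList mao
  if l.length == 3 then
    duasLoopA (count_freq mao).items 0 100
  else 0

-- ===== PORT B =====
-- the two nested while loops of Source B: peel off each maximal run of equal values
def runsOf : List Int → List (Int × Int)
  | [] => []
  | x :: xs =>
      (x, ((xs.takeWhile (fun y => y == x)).length : Int) + 1) ::
        runsOf (xs.dropWhile (fun y => y == x))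
  termination_by ys => ys.length
  decreasing_by
    simp only [List.length_cons]
    exact Nat.lt_succ_of_le (List.length_dropWhile_le _ _)

def duas_duplas_alt (mao : List Int) : Int :=
  let runs := runsOf (PySem.List.sorted mao (fun y => y) false)
  if runs.length != 3 || runs.any (fun p => 2 < p.2) then 0
  else
    let pares := (runs.filter (fun p => p.2 == 2)).map (fun p => p.1)
    3 * ((PySem.List.max? ((0 : Int) :: pares) (fun y => y)).getD 0)
      + 2 * ((PySem.List.min? ((100 : Int) :: pares) (fun y => y)).getD 0) + 20

-- ===== PRECONDITION & SPEC =====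
def Spec_duas_duplas (mao : List Int) (out : Int) : Prop := out = duas_duplas_alt mao
instance (mao : List Int) (out : Int) : Decidable (Spec_duas_duplas mao out) := by unfold Spec_duas_duplas; infer_instance

-- ===== CLAIM (what is proved, stated in full; the proofs are below) =====
def Claim_equal_duas_duplas : Prop := ∀ (mao : List Int), Dom_duas_duplas mao → Spec_duas_duplas mao (duas_duplas mao)

-- ===== LEMMAS AND PROOFS =====

theorem count_freq_eq_counter (mao : List Int) :
    count_freq mao = PySem.Dict.counter mao := rfl

theorem items_count_freq (mao : List Int) :
    (count_freq mao).items
      = (PySem.Set.ofList mao).map (fun k => (k, (mao.count k : Int))) := by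
  rw [count_freq_eq_counter, PySem.Dict.items_counter]

-- A's dict loop, characterised: 0 if some multiplicity is outside {1,2}, otherwise the
-- running max/min over the keys of multiplicity 2.
theorem duasLoopA_char (L : List (Int × Int)) (mx my : Int) :
    duasLoopA L mx my =
      if L.all (fun p => p.2 == 1 || p.2 == 2) then
        3 * (L.foldl (fun m p => if p.2 == 2 then max m p.1 else m) mx)
          + 2 * (L.foldl (fun m p => if p.2 == 2 then min m p.1 else m) my) + 20
      else 0 := by
  induction L generalizing mx my with
  | nil => simp [duasLoopA]
  | cons p rest ih =>
    obtain ⟨k, v⟩ := p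
    by_cases h1 : v = 1
    · subst h1
      rw [show duasLoopA ((k, (1 : Int)) :: rest) mx my = duasLoopA rest mx my from rfl, ih]
      simp only [List.all_cons, List.foldl_cons,
        show ((1 : Int) == 1) = true from rfl, show ((1 : Int) == 2) = false from rfl,
        Bool.or_false, Bool.true_and, if_false, Bool.false_eq_true]
    · by_cases h2 : v = 2
      · subst h2
        rw [show duasLoopA ((k, (2 : Int)) :: rest) mx my
              = duasLoopA rest (max mx k) (min my k) from rfl, ih]
        simp only [List.all_cons, List.foldl_cons,
          show ((2 : Int) == 1) = false from rfl, show ((2 : Int) == 2) = true from rfl,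
          Bool.false_or, Bool.true_and, if_true]
      · simp [duasLoopA, h1, h2]

theorem foldl_step_max (L : List (Int × Int)) (mx : Int) :
    L.foldl (fun m p => if p.2 == 2 then max m p.1 else m) mx
      = ((L.filter (fun p => p.2 == 2)).map Prod.fst).foldl max mx := by
  induction L generalizing mx with
  | nil => rfl
  | cons p rest ih =>
    simp only [List.foldl_cons, List.filter_cons]
    by_cases h : (p.2 == 2) = true
    · rw [if_pos h, if_pos h, List.map_cons, List.foldl_cons]
      exact ih _
    · rw [if_neg h, if_neg h]
      exact ih _

theorem foldl_step_min (L : List (Int × Int)) (my : Int) :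
    L.foldl (fun m p => if p.2 == 2 then min m p.1 else m) my
      = ((L.filter (fun p => p.2 == 2)).map Prod.fst).foldl min my := by
  induction L generalizing my with
  | nil => rfl
  | cons p rest ih =>
    simp only [List.foldl_cons, List.filter_cons]
    by_cases h : (p.2 == 2) = true
    · rw [if_pos h, if_pos h, List.map_cons, List.foldl_cons]
      exact ih _
    · rw [if_neg h, if_neg h]
      exact ih _

-- run-length scan of a sorted list = (value, multiplicity) over some duplicate-free key list
theorem runsOf_char (ys : List Int) (h : ys.Pairwise (· ≤ ·)) :
    ∃ K : List Int, K.Nodup ∧ (∀ k, k ∈ K ↔ k ∈ ys) ∧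
      runsOf ys = K.map (fun k => (k, (ys.count k : Int))) := by
  induction ys using runsOf.induct with
  | case1 => exact ⟨[], by simp, by simp, by simp [runsOf]⟩
  | case2 x xs ih =>
    set t := xs.takeWhile (fun y => y == x) with ht
    set d := xs.dropWhile (fun y => y == x) with hd
    have hxs : t ++ d = xs := List.takeWhile_append_dropWhile
    have hpxs : xs.Pairwise (· ≤ ·) := (List.pairwise_cons.mp h).2
    have hxle : ∀ y ∈ xs, x ≤ y := (List.pairwise_cons.mp h).1
    have hpd : d.Pairwise (· ≤ ·) := hpxs.sublist (List.dropWhile_sublist _)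
    obtain ⟨K, hnd, hmem, hruns⟩ := ih hpd
    -- every element of t equals x
    have htx : ∀ y ∈ t, y = x := by
      intro y hy
      have := List.mem_takeWhile_imp hy
      simpa using this
    -- x does not occur in d
    have hxd : x ∉ d := by
      intro hxmem
      cases hdc : d with
      | nil => simp [hdc] at hxmem
      | cons h0 rest =>
        have hh0 : ¬ (h0 == x) = true := by
          have := List.head?_dropWhile_not (fun y => y == x) xs
          rw [← hd, hdc] at this
          simpa using this
        have hh0x : h0 ≠ x := by simpa using hh0
        have hxh0 : x ≤ h0 := by
          apply hxle
          rw [← hxs, hdc]; simp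
        have hlt : x < h0 := lt_of_le_of_ne hxh0 (fun e => hh0x e.symm)
        have : ∀ y ∈ d, h0 ≤ y := by
          rw [hdc]
          intro y hy
          rcases List.mem_cons.mp hy with rfl | hy
          · exact le_refl _
          · exact (List.pairwise_cons.mp (hdc ▸ hpd)).1 y hy
        have := this x hxmem
        exact absurd this (not_le_of_gt hlt)
    -- counts
    have hct : t.count x = t.length := by
      rw [List.count_eq_length]
      intro y hy; exact (htx y hy).symm ▸ rfl
    have hcd0 : d.count x = 0 := List.count_eq_zero.mpr hxd
    have hcx : (x :: xs).count x = t.length + 1 := by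
      rw [← hxs]
      simp [List.count_cons, List.count_append, hct, hcd0]
    have hck : ∀ k ∈ K, (x :: xs).count k = d.count k := by
      intro k hk
      have hkd : k ∈ d := (hmem k).mp hk
      have hkx : k ≠ x := fun e => hxd (e ▸ hkd)
      have hkt : t.count k = 0 := by
        rw [List.count_eq_zero]
        intro hkmem
        exact hkx (htx k hkmem)
      rw [← hxs]
      simp [List.count_cons, List.count_append, hkt, hkx]
      exact fun e => hkx e.symm
    refine ⟨x :: K, ?_, ?_, ?_⟩
    · refine List.nodup_cons.mpr ⟨fun hxK => hxd ((hmem x).mp hxK), hnd⟩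
    · intro k
      constructor
      · intro hk
        rcases List.mem_cons.mp hk with rfl | hk
        · simp
        · have : k ∈ d := (hmem k).mp hk
          rw [← hxs] at *
          exact List.mem_cons_of_mem _ (List.mem_append_right _ this)
      · intro hk
        rcases List.mem_cons.mp hk with rfl | hk
        · simp
        · rw [← hxs] at hk
          rcases List.mem_append.mp hk with hk | hk
          · exact (htx k hk) ▸ List.mem_cons_self
          · exact List.mem_cons_of_mem _ ((hmem k).mpr hk)
    · show runsOf (x :: xs) = _
      have htail : List.map (fun k => (k, ((d.count k : Nat) : Int))) K
          = List.map (fun k => (k, ((((x :: xs).count k : Nat)) : Int))) K := by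
        apply List.map_congr_left
        intro k hk
        rw [hck k hk]
      rw [runsOf, ← hd, hruns, htail, ← ht]
      simp only [List.map_cons]
      rw [hcx]
      push_cast
      ring_nf

theorem duas_duplas_spec_aux (mao : List Int) :
    duas_duplas mao = duas_duplas_alt mao := by
  have hsp : (PySem.List.sorted mao (fun y => y) false).Perm mao :=
    PySem.List.sorted_perm mao (fun y => y) false
  have hpw : (PySem.List.sorted mao (fun y => y) false).Pairwise (· ≤ ·) :=
    PySem.List.sorted_pairwise mao (fun y => y)
  obtain ⟨K, hnd, hmem, hruns⟩ := runsOf_char _ hpw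
  -- counts in the sorted list are counts in mao
  have hcount : ∀ k : Int, (PySem.List.sorted mao (fun y => y) false).count k = mao.count k :=
    fun k => hsp.count_eq k
  have hruns' : runsOf (PySem.List.sorted mao (fun y => y) false)
      = K.map (fun k => (k, (mao.count k : Int))) := by
    rw [hruns]
    apply List.map_congr_left
    intro k _
    rw [hcount k]
  -- K is a permutation of set(mao)
  have hKS : K.Perm (PySem.Set.ofList mao) := by
    rw [List.perm_ext_iff_of_nodup hnd (PySem.Set.nodup_ofList mao)]
    intro k
    rw [hmem k, PySem.Set.mem_ofList mao k]
    exact PySem.List.mem_sorted mao (fun y => y) false k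
  have hRL : (runsOf (PySem.List.sorted mao (fun y => y) false)).Perm
      ((count_freq mao).items) := by
    rw [hruns', items_count_freq]
    exact hKS.map _
  have hlen : (runsOf (PySem.List.sorted mao (fun y => y) false)).length
      = (PySem.Set.ofList mao).length := by
    rw [hruns', List.length_map, hKS.length_eq]
  unfold duas_duplas duas_duplas_alt
  simp only []
  by_cases h3 : (PySem.Set.ofList mao).length = 3
  · -- set has three elements
    have hc1 : ((PySem.Set.ofList mao).length == 3) = true := by simp [h3]
    have hc2 : ((runsOf (PySem.List.sorted mao (fun y => y) false)).length != 3) = false := by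
      simp [hlen, h3]
    rw [hc1, hc2]
    simp only [if_true, Bool.false_or]
    -- every multiplicity in items is ≥ 1
    have hpos : ∀ p ∈ (count_freq mao).items, 1 ≤ p.2 := by
      rw [items_count_freq]
      intro p hp
      obtain ⟨k, hk, rfl⟩ := List.mem_map.mp hp
      have hkm : k ∈ mao := (PySem.Set.mem_ofList mao k).mp hk
      have : 0 < mao.count k := List.count_pos_iff.mpr hkm
      simp only []
      omega
    -- the two validity conditions agree
    have hall : ((count_freq mao).items.all (fun p => p.2 == 1 || p.2 == 2))
        = !((runsOf (PySem.List.sorted mao (fun y => y) false)).any (fun p => 2 < p.2)) := by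
      rw [Bool.eq_iff_iff]
      simp only [List.all_eq_true, Bool.not_eq_eq_eq_not, Bool.not_true, List.any_eq_false]
      constructor
      · intro hg p hp
        have hp' : p ∈ (count_freq mao).items := hRL.mem_iff.mp hp
        have := hg p hp'
        simp only [Bool.or_eq_true, beq_iff_eq] at this
        simp only [decide_eq_true_eq, not_lt]
        omega
      · intro hg p hp
        have hp' : p ∈ runsOf (PySem.List.sorted mao (fun y => y) false) :=
          hRL.mem_iff.mpr hp
        have h2 := hg p hp'
        have h1 := hpos p hp
        simp only [decide_eq_true_eq, not_lt] at h2
        simp only [Bool.or_eq_true, beq_iff_eq]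
        omega
    rw [duasLoopA_char, hall]
    by_cases hok : ((runsOf (PySem.List.sorted mao (fun y => y) false)).any (fun p => 2 < p.2)) = true
    · simp [hok]
    · rw [Bool.not_eq_true] at hok
      rw [hok]
      simp only [Bool.not_false, if_true]
      -- both formulas: max/min over the pair values
      have hperm2 : (((runsOf (PySem.List.sorted mao (fun y => y) false)).filter
            (fun p => p.2 == 2)).map Prod.fst).Perm
          (((count_freq mao).items.filter (fun p => p.2 == 2)).map Prod.fst) :=
        (hRL.filter _).map _
      rw [foldl_step_max, foldl_step_min]
      rw [PySem.List.max?_id_cons, PySem.List.min?_id_cons]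
      simp only [Option.getD_some]
      rw [List.Perm.foldl_eq (rcomm := ⟨fun b a1 a2 => max_right_comm b a1 a2⟩) hperm2,
          List.Perm.foldl_eq (rcomm := ⟨fun b a1 a2 => min_right_comm b a1 a2⟩) hperm2]
      rfl
  · have hc1 : ((PySem.Set.ofList mao).length == 3) = false := by simp [h3]
    have hc2 : ((runsOf (PySem.List.sorted mao (fun y => y) false)).length != 3) = true := by
      simp [hlen, h3]
    rw [hc1, hc2]
    simp

-- ===== VERDICT (by name: the statement is the Claim_ definition above) =====
theorem duas_duplas_spec : Claim_equal_duas_duplas := by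
  intro mao _
  unfold Spec_duas_duplas
  exact duas_duplas_spec_aux mao
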